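-- pv_equiv track=rewrite | github.com/Techmind/dom | mapgenerator/generate_dom6_map_and_tga_square_ring.py | clockwise_ring_coords
-- ===== SOURCE A (Python) =====
-- def clockwise_ring_coords(side: int) -> list[tuple[int, int]]:
--     """
--     Macro-block coordinates clockwise around a square edge.
--
--     side=3 gives:
--         (0,0) (1,0) (2,0)
--         (0,1)       (2,1)
--         (0,2) (1,2) (2,2)
--
--     Returned order:
--     top left->right, right top->bottom, bottom right->left,
--     left bottom->top.
--     """
--     if side < 1:
--         raise ValueError("side must be at least 1")
--     if side == 1:
--         return [(0, 0)]
--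
--     coords: list[tuple[int, int]] = []
--
--     # Top edge: left -> right
--     for x in range(side):
--         coords.append((x, 0))
--
--     # Right edge: top -> bottom, excluding already-added top-right corner
--     for y in range(1, side):
--         coords.append((side - 1, y))
--
--     # Bottom edge: right -> left, excluding already-added bottom-right corner
--     for x in range(side - 2, -1, -1):
--         coords.append((x, side - 1))
--
--     # Left edge: bottom -> top, excluding both corners
--     for y in range(side - 2, 0, -1):
--         coords.append((0, y))
--
--     return coords
-- ===== SOURCE B (Python) =====
-- def clockwise_ring_coords(side: int) -> list[tuple[int, int]]:
--     """Same ring, but each cell computed by a closed-form index formula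
--     over a single range instead of four edge loops."""
--     if side < 1:
--         raise ValueError("side must be at least 1")
--     if side == 1:
--         return [(0, 0)]
--     m = side - 1
--
--     def cell(i: int) -> tuple[int, int]:
--         if i <= m:
--             return (i, 0)
--         if i <= 2 * m:
--             return (m, i - m)
--         if i <= 3 * m:
--             return (3 * m - i, m)
--         return (0, 4 * m - i)
--
--     return [cell(i) for i in range(4 * m)]
-- ===== Notes on version B (the rewrite author's own statement) =====
-- stated objective: alternative
-- what changed: Replaces the four fixed edge loops by one pass over range(4*(side-1)) with a closed-form index-to-coordinate formula; same cost, different decomposition.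
import Mathlib
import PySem

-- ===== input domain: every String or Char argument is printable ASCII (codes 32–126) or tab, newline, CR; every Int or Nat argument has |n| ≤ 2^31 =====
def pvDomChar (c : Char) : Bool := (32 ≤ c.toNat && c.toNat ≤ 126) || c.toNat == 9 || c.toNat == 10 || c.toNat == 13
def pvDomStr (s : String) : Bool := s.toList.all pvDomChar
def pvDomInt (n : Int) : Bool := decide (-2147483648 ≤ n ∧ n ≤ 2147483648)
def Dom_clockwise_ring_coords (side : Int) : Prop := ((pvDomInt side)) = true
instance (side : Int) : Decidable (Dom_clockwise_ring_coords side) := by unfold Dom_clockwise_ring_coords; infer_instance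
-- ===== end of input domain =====

-- B replaces A's four fixed edge loops by one map over range(4*(side-1)) with a
-- closed-form index-to-coordinate formula (alternative decomposition, same cost).

-- ===== PORT A =====
-- side < 1 raises ValueError in Python: excluded by Pre_; the port returns [] there.
def clockwise_ring_coords (side : Int) : List (Int × Int) :=
  if side < 1 then []
  else if side = 1 then [((0:Int), (0:Int))]
  else
    let c1 := (PySem.List.pyRange 0 side 1).foldl (fun acc x => acc ++ [(x, (0:Int))]) []
    let c2 := (PySem.List.pyRange 1 side 1).foldl (fun acc y => acc ++ [(side - 1, y)]) c1
    let c3 := (PySem.List.pyRange (side - 2) (-1) (-1)).foldl (fun acc x => acc ++ [(x, side - 1)]) c2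
    (PySem.List.pyRange (side - 2) 0 (-1)).foldl (fun acc y => acc ++ [((0:Int), y)]) c3

-- ===== PORT B =====
def pvCell (m i : Int) : Int × Int :=
  if i ≤ m then (i, 0)
  else if i ≤ 2 * m then (m, i - m)
  else if i ≤ 3 * m then (3 * m - i, m)
  else (0, 4 * m - i)

def clockwise_ring_coords_alt (side : Int) : List (Int × Int) :=
  if side < 1 then []
  else if side = 1 then [((0:Int), (0:Int))]
  else (PySem.List.pyRange 0 (4 * (side - 1)) 1).map (pvCell (side - 1))

-- ===== PRECONDITION & SPEC =====
-- Pre_ excludes exactly side < 1, where Python A raises ValueError.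
def Pre_clockwise_ring_coords (side : Int) : Prop := 1 ≤ side
instance (side : Int) : Decidable (Pre_clockwise_ring_coords side) := by unfold Pre_clockwise_ring_coords; infer_instance
def pvWitness_clockwise_ring_coords : Int := 3

def Spec_clockwise_ring_coords (side : Int) (out : List (Int × Int)) : Prop := out = clockwise_ring_coords_alt side
instance (side : Int) (out : List (Int × Int)) : Decidable (Spec_clockwise_ring_coords side out) := by unfold Spec_clockwise_ring_coords; infer_instance

-- ===== CLAIM (what is proved, stated in full; the proofs are below) =====
def Claim_equal_clockwise_ring_coords : Prop := ∀ (side : Int), Dom_clockwise_ring_coords side → Pre_clockwise_ring_coords side → Spec_clockwise_ring_coords side (clockwise_ring_coords side)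

-- ===== LEMMAS AND PROOFS =====

-- The four chunks of B's single range correspond to A's four edge loops (side = n+2).
theorem pv_chunk1 (n : Nat) :
    (PySem.List.pyRange 0 ((n:Int)+2) 1).map (pvCell ((n:Int)+1))
      = (PySem.List.pyRange 0 ((n:Int)+2) 1).map (fun x => (x, (0:Int))) := by
  refine List.map_congr_left ?_
  intro x hx
  rw [PySem.List.mem_pyRange_one] at hx
  simp only [pvCell, if_pos (show x ≤ (n:Int)+1 by omega)]

theorem pv_chunk2 (n : Nat) :
    (PySem.List.pyRange ((n:Int)+2) (2*(n:Int)+3) 1).map (pvCell ((n:Int)+1))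
      = (PySem.List.pyRange 1 ((n:Int)+2) 1).map (fun y => ((n:Int)+1, y)) := by
  rw [PySem.List.pyRange_one, PySem.List.pyRange_one]
  have h1 : ((2*(n:Int)+3) - ((n:Int)+2)).toNat = n+1 := by omega
  have h2 : (((n:Int)+2) - 1).toNat = n+1 := by omega
  rw [h1, h2, List.map_map, List.map_map]
  refine List.map_congr_left ?_
  intro k hk
  rw [List.mem_range] at hk
  simp only [Function.comp, pvCell]
  rw [if_neg (by omega), if_pos (by omega)]
  rw [Prod.mk.injEq]; constructor <;> omega

theorem pv_chunk3 (n : Nat) :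
    (PySem.List.pyRange (2*(n:Int)+3) (3*(n:Int)+4) 1).map (pvCell ((n:Int)+1))
      = (PySem.List.pyRange ((n:Int)) (-1) (-1)).map (fun x => (x, (n:Int)+1)) := by
  rw [PySem.List.pyRange_one, PySem.List.pyRange_neg_one]
  have h1 : ((3*(n:Int)+4) - (2*(n:Int)+3)).toNat = n+1 := by omega
  have h2 : ((n:Int) - (-1)).toNat = n+1 := by omega
  rw [h1, h2, List.map_map, List.map_map]
  refine List.map_congr_left ?_
  intro k hk
  rw [List.mem_range] at hk
  simp only [Function.comp, pvCell]
  rw [if_neg (by omega), if_neg (by omega), if_pos (by omega)]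
  rw [Prod.mk.injEq]; constructor <;> omega

theorem pv_chunk4 (n : Nat) :
    (PySem.List.pyRange (3*(n:Int)+4) (4*(n:Int)+4) 1).map (pvCell ((n:Int)+1))
      = (PySem.List.pyRange ((n:Int)) 0 (-1)).map (fun y => ((0:Int), y)) := by
  rw [PySem.List.pyRange_one, PySem.List.pyRange_neg_one]
  have h1 : ((4*(n:Int)+4) - (3*(n:Int)+4)).toNat = n := by omega
  have h2 : ((n:Int) - 0).toNat = n := by omega
  rw [h1, h2, List.map_map, List.map_map]
  refine List.map_congr_left ?_
  intro k hk
  rw [List.mem_range] at hk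
  simp only [Function.comp, pvCell]
  rw [if_neg (by omega), if_neg (by omega), if_neg (by omega)]
  rw [Prod.mk.injEq]; constructor <;> omega

theorem pv_main (n : Nat) :
    clockwise_ring_coords ((n : Int) + 2) = clockwise_ring_coords_alt ((n : Int) + 2) := by
  have hlt : ¬ ((n:Int) + 2 < 1) := by omega
  have hne : ((n:Int) + 2) ≠ 1 := by omega
  simp only [clockwise_ring_coords, clockwise_ring_coords_alt, if_neg hlt, if_neg hne]
  simp only [PySem.List.foldl_append_singleton_eq_map, List.nil_append]
  have e1 : ((n:Int) + 2) - 1 = (n:Int) + 1 := by ring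
  have e2 : ((n:Int) + 2) - 2 = (n:Int) := by ring
  rw [e1, e2]
  rw [PySem.List.pyRange_one_append 0 ((n:Int)+2) (4*((n:Int)+1)) (by omega) (by omega),
      PySem.List.pyRange_one_append ((n:Int)+2) (2*(n:Int)+3) (4*((n:Int)+1)) (by omega) (by omega),
      PySem.List.pyRange_one_append (2*(n:Int)+3) (3*(n:Int)+4) (4*((n:Int)+1)) (by omega) (by omega)]
  have e3 : 4*((n:Int)+1) = 4*(n:Int)+4 := by ring
  rw [e3, List.map_append, List.map_append, List.map_append,
      pv_chunk1, pv_chunk2, pv_chunk3, pv_chunk4]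
  simp [List.append_assoc]

-- ===== VERDICT (by name: the statement is the Claim_ definition above) =====
theorem clockwise_ring_coords_spec : Claim_equal_clockwise_ring_coords := by
  intro side _ hpre
  unfold Spec_clockwise_ring_coords
  rcases eq_or_lt_of_le hpre with h1 | h2
  · simp [clockwise_ring_coords, clockwise_ring_coords_alt, ← h1]
  · obtain ⟨n, hn⟩ : ∃ n : Nat, side = (n : Int) + 2 := ⟨(side - 2).toNat, by omega⟩
    rw [hn, pv_main]
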